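-- pv_equiv track=rewrite | github.com/andyin119/capstone-chiplet | partitioning/simulated_annealing.py | count_edge_crossings
-- ===== SOURCE A (Python) =====
-- def count_edge_crossings(nets, node_to_layer):
--     """
--     Count the number of edge crossings. For each net, every pair of nodes
--     that are assigned to different layers is considered a crossing.
--     """
--     crossing_count = 0
--     for connections in nets:
--         # Filter out nodes not assigned in our solution (if any)
--         valid_nodes = [node for node in connections if node in node_to_layer]
--         # For every unique pair in the net, check if they are in different layers.
--         n = len(valid_nodes)
--         for i in range(n):
--             for j in range(i + 1, n):
--                 if node_to_layer[valid_nodes[i]] != node_to_layer[valid_nodes[j]]: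
--                     crossing_count += 1
--     return crossing_count
-- ===== SOURCE B (Python) =====
-- def count_edge_crossings(nets, node_to_layer):
--     """
--     Count the number of edge crossings. For each net, every pair of nodes
--     that are assigned to different layers is considered a crossing.
--
--     Single left-to-right pass per net: each valid node is paired with the
--     valid nodes seen before it; the pairs in a different layer are exactly
--     (seen so far) - (seen so far in the same layer).
--     """
--     total = 0
--     for connections in nets:
--         counts = {}
--         seen = 0
--         for node in connections:
--             if node in node_to_layer:
--                 layer = node_to_layer[node]
--                 c = counts.get(layer, 0)
--                 total += seen - c
--                 counts[layer] = c + 1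
--                 seen += 1
--     return total
-- ===== Notes on version B (the rewrite author's own statement) =====
-- stated objective: faster
-- what changed: Replaces A's quadratic all-pairs comparison inside each net by a single left-to-right pass keeping per-layer counts, adding for each node the number of previously seen valid nodes in a different layer.
import Mathlib
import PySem

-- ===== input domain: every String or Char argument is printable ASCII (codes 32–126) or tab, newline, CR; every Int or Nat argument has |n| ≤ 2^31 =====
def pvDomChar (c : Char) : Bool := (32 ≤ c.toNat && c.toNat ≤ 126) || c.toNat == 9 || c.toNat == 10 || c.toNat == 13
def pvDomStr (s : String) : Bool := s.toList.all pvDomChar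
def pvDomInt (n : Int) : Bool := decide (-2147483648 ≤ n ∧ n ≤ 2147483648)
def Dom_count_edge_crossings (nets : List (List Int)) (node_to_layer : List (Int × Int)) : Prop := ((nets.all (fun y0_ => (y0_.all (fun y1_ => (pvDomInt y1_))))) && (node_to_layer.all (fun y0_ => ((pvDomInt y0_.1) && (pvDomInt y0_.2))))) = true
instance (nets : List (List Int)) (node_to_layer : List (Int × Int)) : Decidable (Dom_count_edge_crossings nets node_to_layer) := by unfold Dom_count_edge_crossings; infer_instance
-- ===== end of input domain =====

-- B replaces A's quadratic all-pairs scan per net by a single pass pairing each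
-- node with the already-seen nodes via a per-layer counter (objective: faster).

-- ===== PORT A =====
-- A's double index loop: node i (the head) is compared with every later node j
def pvPairsA (d : PySem.Dict Int Int) : List Int → Int → Int
  | [], acc => acc
  | x :: xs, acc =>
      pvPairsA d xs (xs.foldl (fun a y => if d.get? x ≠ d.get? y then a + 1 else a) acc)

def count_edge_crossings (nets : List (List Int)) (node_to_layer : List (Int × Int)) : Int :=
  let d := PySem.Dict.ofList node_to_layer
  nets.foldl (fun crossing_count connections =>
    let valid_nodes := connections.filter (fun node => d.contains node)
    pvPairsA d valid_nodes crossing_count) 0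

-- ===== PORT B =====
def count_edge_crossings_alt (nets : List (List Int)) (node_to_layer : List (Int × Int)) : Int :=
  let d := PySem.Dict.ofList node_to_layer
  nets.foldl (fun total connections =>
    (connections.foldl
      (fun (st : PySem.Dict Int Int × Int × Int) node =>
        match d.get? node with
        | none => st
        | some layer =>
            let c := st.1.getD layer 0
            (st.1.insert layer (c + 1), st.2.1 + 1, st.2.2 + (st.2.1 - c)))
      (PySem.Dict.empty, 0, total)).2.2) 0

-- ===== PRECONDITION & SPEC =====
def Spec_count_edge_crossings (nets : List (List Int)) (node_to_layer : List (Int × Int)) (out : Int) : Prop := out = count_edge_crossings_alt nets node_to_layer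
instance (nets : List (List Int)) (node_to_layer : List (Int × Int)) (out : Int) : Decidable (Spec_count_edge_crossings nets node_to_layer out) := by unfold Spec_count_edge_crossings; infer_instance

-- ===== CLAIM =====
def Claim_equal_count_edge_crossings : Prop := ∀ (nets : List (List Int)) (node_to_layer : List (Int × Int)), Dom_count_edge_crossings nets node_to_layer → Spec_count_edge_crossings nets node_to_layer (count_edge_crossings nets node_to_layer)

-- ===== LEMMAS AND PROOFS =====

-- number of layer-discordant ordered pairs i < j (head against each later element)
def pvPairsNe : List Int → Int
  | [] => 0
  | x :: xs => (xs.countP (fun y => decide (x ≠ y)) : Int) + pvPairsNe xs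

theorem pvGetD_of_contains (d : PySem.Dict Int Int) (x : Int) (h : d.contains x = true) :
    d.get? x = some (d.getD x 0) := by
  rcases hg : d.get? x with _ | v
  · rw [PySem.Dict.contains_eq_isSome_get?, hg] at h; simp at h
  · simp [PySem.Dict.getD_eq_get?_getD, hg]

theorem pvPairsA_eq (d : PySem.Dict Int Int) (vs : List Int) (acc : Int)
    (h : ∀ x ∈ vs, d.contains x = true) :
    pvPairsA d vs acc = acc + pvPairsNe (vs.map (fun x => d.getD x 0)) := by
  induction vs generalizing acc with
  | nil => simp [pvPairsA, pvPairsNe]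
  | cons x xs ih =>
    have hx := pvGetD_of_contains d x (h x (by simp))
    have hinner :
        xs.foldl (fun a y => if d.get? x ≠ d.get? y then a + 1 else a) acc
          = acc + (xs.countP (fun y => decide (d.getD x 0 ≠ d.getD y 0)) : Int) := by
      rw [PySem.List.foldl_congr_mem xs _
            (fun a y => if (decide (d.getD x 0 ≠ d.getD y 0)) = true then a + 1 else a) acc
            (by
              intro a y hy
              have hyc := pvGetD_of_contains d y (h y (by simp [hy]))
              simp [hx, hyc])]
      exact PySem.List.foldl_count_if _ xs acc
    rw [pvPairsA, hinner, ih _ (fun y hy => h y (by simp [hy]))]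
    simp [pvPairsNe, List.countP_map, Function.comp_def]
    ring

-- snoc characterisation of pvPairsNe: appending x adds one pair per earlier discordant node
theorem pvPairsNe_snoc (ys : List Int) (x : Int) :
    pvPairsNe (ys ++ [x]) = pvPairsNe ys + ((ys.length : Int) - (ys.count x : Int)) := by
  induction ys with
  | nil => simp [pvPairsNe]
  | cons y ys ih =>
    simp only [List.cons_append, pvPairsNe, List.countP_append, ih, List.count_cons,
      List.length_cons, List.countP_cons, List.countP_nil]
    by_cases hyx : y = x
    · subst hyx; simp; ring
    · have : (x == y) = false := by simp [Ne.symm hyx]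
      simp [hyx]
      ring

-- B's inner pass, on the layer list: invariant (counter, length, running total)
theorem pvFoldB_inv (ls : List Int) (t : Int) :
    ls.foldl
      (fun (st : PySem.Dict Int Int × Int × Int) l =>
        (st.1.insert l (st.1.getD l 0 + 1), st.2.1 + 1, st.2.2 + (st.2.1 - st.1.getD l 0)))
      (PySem.Dict.empty, 0, t)
    = (ls.foldl (fun d l => d.insert l (d.getD l 0 + 1)) PySem.Dict.empty,
       (ls.length : Int), t + pvPairsNe ls) := by
  induction ls using List.reverseRecOn with
  | nil => simp [pvPairsNe]
  | append_singleton ys x ih =>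
    rw [List.foldl_append, ih, List.foldl_append]
    simp only [List.foldl_cons, List.foldl_nil, List.length_append, List.length_cons,
      List.length_nil, pvPairsNe_snoc, PySem.Dict.getD_foldl_insert_add_one,
      PySem.Dict.getD_empty]
    refine Prod.ext rfl (Prod.ext ?_ ?_) <;> push_cast <;> ring

-- B's actual per-net fold equals the pass over the valid nodes' layers
theorem pvFoldB_filter (d : PySem.Dict Int Int) (conns : List Int)
    (st : PySem.Dict Int Int × Int × Int) :
    conns.foldl
      (fun (st : PySem.Dict Int Int × Int × Int) node =>
        match d.get? node with
        | none => st
        | some layer =>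
            let c := st.1.getD layer 0
            (st.1.insert layer (c + 1), st.2.1 + 1, st.2.2 + (st.2.1 - c))) st
    = ((conns.filter (fun n => d.contains n)).map (fun x => d.getD x 0)).foldl
        (fun (st : PySem.Dict Int Int × Int × Int) l =>
          (st.1.insert l (st.1.getD l 0 + 1), st.2.1 + 1, st.2.2 + (st.2.1 - st.1.getD l 0))) st := by
  induction conns generalizing st with
  | nil => rfl
  | cons n ns ih =>
    rcases hg : d.get? n with _ | v
    · have hc : d.contains n = false := by
        rw [PySem.Dict.contains_eq_isSome_get?, hg]; rfl
      simp only [List.foldl_cons, hg, List.filter_cons, hc]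
      exact ih st
    · have hc : d.contains n = true := by
        rw [PySem.Dict.contains_eq_isSome_get?, hg]; rfl
      have hv : d.getD n 0 = v := by simp [PySem.Dict.getD_eq_get?_getD, hg]
      simp only [List.foldl_cons, hg, List.filter_cons, hc, if_true, List.map_cons, hv]
      exact ih _

-- per-net agreement, then fold over the nets
theorem pv_per_net (d : PySem.Dict Int Int) (conns : List Int) (acc : Int) :
    pvPairsA d (conns.filter (fun n => d.contains n)) acc
    = (conns.foldl
        (fun (st : PySem.Dict Int Int × Int × Int) node =>
          match d.get? node with
          | none => st
          | some layer =>
              let c := st.1.getD layer 0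
              (st.1.insert layer (c + 1), st.2.1 + 1, st.2.2 + (st.2.1 - c)))
        (PySem.Dict.empty, 0, acc)).2.2 := by
  rw [pvFoldB_filter, pvFoldB_inv,
      pvPairsA_eq d _ acc (by intro x hx; exact (List.mem_filter.mp hx).2)]

-- ===== VERDICT =====
theorem count_edge_crossings_spec : Claim_equal_count_edge_crossings := by
  intro nets node_to_layer _
  unfold Spec_count_edge_crossings count_edge_crossings count_edge_crossings_alt
  rw [PySem.List.foldl_congr_mem nets _ _ 0
        (by intro acc conns _; exact pv_per_net (PySem.Dict.ofList node_to_layer) conns acc)]
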